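-- pv_equiv track=rewrite | github.com/Golam-Tawhid/BioInformatics | Task 2/task2.py | dna_sequence
-- ===== SOURCE A (Python) =====
-- def dna_sequence(arr):
--     """
--     Find the matches and add them together
--     """
--     fin = ""
--
--     for i, dna1 in enumerate(arr):
--         for j, dna2 in enumerate(arr):
--             idx = -1
--             while idx >= -5:
--                 prefix = dna1[idx:]
--                 idx -= 1
--                 if dna2.startswith(prefix) and i != j:
--                     fin += dna1
--                     fin += dna2.lstrip(prefix)
--                     break
--
--     return fin
-- ===== SOURCE B (Python) =====
-- def dna_sequence(arr):
--     """
--     Same result as the quadratic pair scan, but sequences are indexed once by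
--     their prefixes of length 0..5, so each string only looks up its suffixes.
--     """
--     n = len(arr)
--     index = {}
--     for j, s in enumerate(arr):
--         index.setdefault("", []).append(j)
--         for k in range(1, min(5, len(s)) + 1):
--             index.setdefault(s[:k], []).append(j)
--     out = []
--     for i, dna1 in enumerate(arr):
--         matched = [None] * n
--         for k in range(1, 6):
--             suf = dna1[-k:]
--             for j in index.get(suf, ()):
--                 if j != i and matched[j] is None:
--                     matched[j] = suf
--         for j, suf in enumerate(matched):
--             if suf is not None:
--                 out.append(dna1)
--                 out.append(arr[j].lstrip(suf))
--     return "".join(out)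
-- ===== Notes on version B (the rewrite author's own statement) =====
-- stated objective: faster
-- what changed: Instead of scanning all ordered pairs and retrying up to five suffixes per pair, B builds one dict from every length-0..5 prefix to the indices of the strings carrying it, fills a per-row matched array by looking up the row's five suffixes, and emits the matches in index order.
import Mathlib
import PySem

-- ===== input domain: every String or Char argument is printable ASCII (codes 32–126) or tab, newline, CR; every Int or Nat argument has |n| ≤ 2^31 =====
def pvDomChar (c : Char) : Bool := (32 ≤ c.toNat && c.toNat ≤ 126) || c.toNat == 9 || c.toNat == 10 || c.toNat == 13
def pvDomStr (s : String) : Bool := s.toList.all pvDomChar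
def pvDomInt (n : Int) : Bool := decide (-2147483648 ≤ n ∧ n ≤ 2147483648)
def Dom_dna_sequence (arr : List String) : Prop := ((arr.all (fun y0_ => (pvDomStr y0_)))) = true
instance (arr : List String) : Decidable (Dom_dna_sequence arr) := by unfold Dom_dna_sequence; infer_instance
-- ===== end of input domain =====

-- B indexes the sequences once by their prefixes of length 0..5 and looks each suffix up,
-- instead of A's scan over all ordered pairs; objective: faster.

-- shared hand-ported primitive: Python's s.lstrip(chars) — drops leading characters that
-- occur in `chars` (exact; lstrip("") drops nothing since membership in [] is false)
def lstripChars (s chars : List Char) : List Char :=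
  s.dropWhile (fun c => chars.contains c)

-- ===== PORT A =====
-- the `while idx >= -5` loop; fuel 6 is enough for idx = -1,…,-6 (exit via the condition)
def dnaWhile (d1 d2 : List Char) (neq : Bool) (fin : List Char) (idx : Int) : Nat → List Char
  | 0 => fin
  | Nat.succ f =>
    if -5 ≤ idx then
      let pre := PySem.Chars.slice d1 (some idx) none
      if PySem.Chars.startswith d2 pre && neq then
        (fin ++ d1) ++ lstripChars d2 pre
      else dnaWhile d1 d2 neq fin (idx - 1) f
    else fin

def dna_sequence (arr : List String) : String :=
  let l := arr.map String.toList
  String.ofList ((PySem.List.enumerate l).foldl (fun fin p =>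
    (PySem.List.enumerate l).foldl (fun fin q =>
      dnaWhile p.2 q.2 (p.1 != q.1) fin (-1) 6) fin) [])

-- ===== PORT B =====
-- index.setdefault(p, []).append(j)  ==  index[p] = index.get(p, []) + [j]
def bIndex (l : List (List Char)) : PySem.Dict (List Char) (List Int) :=
  (PySem.List.enumerate l).foldl (fun d q =>
    let d := d.modify [] [] (· ++ [q.1])
    (PySem.List.pyRange 1 (min 5 (q.2.length : Int) + 1) 1).foldl (fun d k =>
      d.modify (PySem.Chars.slice q.2 none (some k)) [] (· ++ [q.1])) d)
    PySem.Dict.empty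

-- j.toNat is exact: every j stored in the index comes from enumerate, hence 0 ≤ j
def dna_sequence_alt (arr : List String) : String :=
  let l := arr.map String.toList
  let index := bIndex l
  String.ofList (PySem.Chars.join []
    ((PySem.List.enumerate l).foldl (fun out p =>
      let matched :=
        (PySem.List.pyRange 1 6 1).foldl (fun m k =>
          let suf := PySem.Chars.slice p.2 (some (-k)) none
          (index.getD suf []).foldl (fun m j =>
            if j != p.1 && (m.getD j.toNat none).isNone then m.set j.toNat (some suf) else m) m)
          (List.replicate l.length (none : Option (List Char)))
      (PySem.List.enumerate matched).foldl (fun out q =>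
        match q.2 with
        | some suf => (out ++ [p.2]) ++ [lstripChars (PySem.List.pyGetD l q.1 []) suf]
        | none => out) out) []))

-- ===== PRECONDITION & SPEC =====
def Spec_dna_sequence (arr : List String) (out : String) : Prop := out = dna_sequence_alt arr
instance (arr : List String) (out : String) : Decidable (Spec_dna_sequence arr out) := by unfold Spec_dna_sequence; infer_instance

-- ===== CLAIM (what is proved, stated in full; the proofs are below) =====
def Claim_equal_dna_sequence : Prop := ∀ (arr : List String), Dom_dna_sequence arr → Spec_dna_sequence arr (dna_sequence arr)

-- ===== LEMMAS AND PROOFS =====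

-- the five suffixes A tries, in A's order
def sufs (d1 : List Char) : List (List Char) :=
  [(-1 : Int), -2, -3, -4, -5].map (fun k => PySem.Chars.slice d1 (some k) none)

-- what one (i, j) pair with i ≠ j contributes
def pieceFor (d1 d2 : List Char) : List Char :=
  match (sufs d1).find? (fun s => PySem.Chars.startswith d2 s) with
  | some s => d1 ++ lstripChars d2 s
  | none => []

-- the keys under which index j of string s is filed
def pyPrefixes (s : List Char) : List (List Char) :=
  [] :: (PySem.List.pyRange 1 (min 5 (s.length : Int) + 1) 1).map
    (fun k => PySem.Chars.slice s none (some k))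

-- B's matched array for row i (= the let-bound `matched` of the port, with index = bIndex l)
def mfold (l : List (List Char)) (i : Int) (d1 : List Char) : List (Option (List Char)) :=
  (PySem.List.pyRange 1 6 1).foldl (fun m k =>
    let suf := PySem.Chars.slice d1 (some (-k)) none
    ((bIndex l).getD suf []).foldl (fun m j =>
      if j != i && (m.getD j.toNat none).isNone then m.set j.toNat (some suf) else m) m)
    (List.replicate l.length (none : Option (List Char)))

-- what row i's output pass emits for one matched entry
def hOut (d1 : List Char) (l : List (List Char)) (q : Int × Option (List Char)) :
    List (List Char) :=
  match q.2 with
  | some suf => [d1, lstripChars (PySem.List.pyGetD l q.1 []) suf]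
  | none => []

lemma dnaWhile_eq (d1 d2 : List Char) (neq : Bool) (fin : List Char) :
    dnaWhile d1 d2 neq fin (-1) 6 = fin ++ (if neq then pieceFor d1 d2 else []) := by
  cases neq with
  | false => simp [dnaWhile]
  | true =>
    simp only [dnaWhile, pieceFor, sufs, List.map, List.find?, Bool.and_true]
    norm_num
    split_ifs <;> simp_all

lemma mem_pyPrefixes (p s : List Char) :
    p ∈ pyPrefixes s ↔ p.length ≤ 5 ∧ p <+: s := by
  simp only [pyPrefixes, List.mem_cons, List.mem_map, PySem.List.mem_pyRange_one,
    PySem.Chars.slice_eq_listSlice]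
  constructor
  · rintro (rfl | ⟨k, ⟨hk1, hk2⟩, rfl⟩)
    · simp
    · rw [PySem.List.slice_to s (b := k) (by omega)]
      constructor
      · have := List.length_take (l := s) (i := k.toNat); omega
      · exact List.take_prefix _ _
  · rintro ⟨hlen, hpre⟩
    rcases Nat.eq_zero_or_pos p.length with h0 | h0
    · left; exact List.eq_nil_of_length_eq_zero h0
    · right
      refine ⟨(p.length : Int), ⟨by omega, by
        have := hpre.length_le; omega⟩, ?_⟩
      rw [PySem.List.slice_to s (b := (p.length : Int)) (by omega)]
      simp only [Int.toNat_natCast]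
      exact (List.prefix_iff_eq_take.mp hpre).symm

lemma bIndex_eq_pairs_fold (l : List (List Char)) :
    bIndex l = ((PySem.List.enumerate l).flatMap
        (fun q => (pyPrefixes q.2).map (fun pre => (pre, q.1)))).foldl
      (fun d p => d.modify p.1 [] (· ++ [p.2])) PySem.Dict.empty := by
  rw [List.foldl_flatMap]
  apply List.foldl_ext
  intro d q _
  simp [pyPrefixes, List.foldl_map, PySem.Chars.slice_eq_listSlice]

lemma mem_bIndex (l : List (List Char)) (p : List Char) (x : Int) :
    x ∈ (bIndex l).getD p [] ↔
      ∃ t : Nat, ∃ h : t < l.length, x = (t : Int) ∧ p ∈ pyPrefixes l[t] := by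
  rw [bIndex_eq_pairs_fold, PySem.Dict.getD_foldl_modify_append]
  simp only [PySem.Dict.getD_empty, List.nil_append, List.mem_map, List.mem_filter,
    List.mem_flatMap, PySem.List.mem_enumerate_iff]
  constructor
  · rintro ⟨⟨pre, j⟩, ⟨⟨q, ⟨⟨t, ht, rfl⟩, hpre⟩⟩, hb⟩, rfl⟩
    rcases hpre with ⟨pre', hpre', heq⟩
    cases heq
    simp only [beq_iff_eq] at hb
    exact ⟨t, ht, by simp, hb ▸ hpre'⟩
  · rintro ⟨t, ht, rfl, hp⟩
    exact ⟨(p, (t : Int)), ⟨⟨((t:Int), l[t]), ⟨t, ht, by simp⟩,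
      ⟨p, hp, rfl⟩⟩, by simp⟩, rfl⟩

lemma sufs_short (d1 s : List Char) (hs : s ∈ sufs d1) : s.length ≤ 5 := by
  simp only [sufs, List.mem_map, List.mem_cons,
    PySem.Chars.slice_eq_listSlice] at hs
  rcases hs with ⟨k, hk, rfl⟩
  have h1 : ∀ m : Nat, 0 < m → (PySem.List.slice d1 (some (-(m:Int))) none).length ≤ m := by
    intro m hm
    rw [PySem.List.slice_from_neg_natCast d1 m hm]
    simp; omega
  rcases hk with rfl | rfl | rfl | rfl | (rfl | h)
  · exact le_trans (h1 1 (by norm_num)) (by norm_num)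
  · exact le_trans (h1 2 (by norm_num)) (by norm_num)
  · exact le_trans (h1 3 (by norm_num)) (by norm_num)
  · exact le_trans (h1 4 (by norm_num)) (by norm_num)
  · exact h1 5 (by norm_num)
  · cases h

lemma bucket_fold_length (js : List Int) (i : Int) (s : List Char)
    (m : List (Option (List Char))) :
    (js.foldl (fun m j =>
        if j != i && (m.getD j.toNat none).isNone then m.set j.toNat (some s) else m) m).length
      = m.length := by
  induction js generalizing m with
  | nil => rfl
  | cons j js ih =>
    simp only [List.foldl_cons]
    rw [ih]
    split <;> simp

lemma bucket_fold_getD (js : List Int) (i : Int) (s : List Char)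
    (m : List (Option (List Char))) (t : Nat) (ht : t < m.length)
    (hnn : ∀ j ∈ js, 0 ≤ j) :
    ((js.foldl (fun m j =>
        if j != i && (m.getD j.toNat none).isNone then m.set j.toNat (some s) else m) m).getD t none)
      = if (t : Int) ∈ js ∧ (t : Int) ≠ i ∧ m.getD t none = none then some s
        else m.getD t none := by
  induction js generalizing m with
  | nil => simp
  | cons j js ih =>
    simp only [List.foldl_cons, List.mem_cons]
    have hj : 0 ≤ j := hnn j (by simp)
    have hnn' : ∀ j ∈ js, 0 ≤ j := fun a ha => hnn a (by simp [ha])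
    by_cases hji : (j != i && (m.getD j.toNat none).isNone) = true
    · rw [if_pos hji]
      rw [ih _ (by simpa using ht) hnn']
      simp only [Bool.and_eq_true, bne_iff_ne, Option.isNone_iff_eq_none] at hji
      by_cases hjt : j.toNat = t
      · have hjeq : j = (t : Int) := by omega
        have hset : (m.set j.toNat (some s)).getD t none = some s := by
          rw [hjt, List.getD_eq_getElem?_getD, List.getElem?_set_self ht]
          rfl
        simp only [hset]
        have hm : m.getD t none = none := hjt ▸ hji.2
        have hti : (t : Int) ≠ i := hjeq ▸ hji.1
        rw [if_neg (by simp), if_pos ⟨Or.inl hjeq.symm, hti, hm⟩]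
      · have hset : (m.set j.toNat (some s)).getD t none = m.getD t none := by
          rw [List.getD_eq_getElem?_getD, List.getElem?_set_ne (by omega),
            ← List.getD_eq_getElem?_getD]
        rw [hset]
        have hne : (t : Int) ≠ j := by omega
        by_cases hmem : (t : Int) ∈ js <;> simp [hmem, hne]
    · rw [if_neg hji]
      rw [ih _ ht hnn']
      simp only [Bool.and_eq_true, bne_iff_ne, Option.isNone_iff_eq_none, not_and_or] at hji
      by_cases hjt : (t:Int) = j
      · have ht2 : j.toNat = t := by omega
        have hcon : ¬ ((t:Int) ≠ i ∧ m.getD t none = none) := by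
          rintro ⟨h1, h2⟩
          rcases hji with h' | h'
          · exact h' (by rw [← hjt]; exact h1)
          · rw [ht2] at h'; exact h' h2
        rw [if_neg (by tauto), if_neg (by tauto)]
      · by_cases hmem : (t : Int) ∈ js <;> simp [hmem, hjt]

lemma find?_congr_mem {α : Type} (p q : α → Bool) (L : List α)
    (h : ∀ x ∈ L, p x = q x) : L.find? p = L.find? q := by
  induction L with
  | nil => rfl
  | cons a L ih =>
    simp only [List.find?]
    rw [h a (by simp)]
    split
    · rfl
    · exact ih (fun x hx => h x (by simp [hx]))

-- pointwise effect of the whole suffix loop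
lemma suffold_getD (B : List Char → List Int) (hB : ∀ s, ∀ j ∈ B s, 0 ≤ j) (i : Int)
    (ss : List (List Char)) (m : List (Option (List Char))) (t : Nat) (ht : t < m.length) :
    ((ss.foldl (fun m s => (B s).foldl (fun m j =>
        if j != i && (m.getD j.toNat none).isNone then m.set j.toNat (some s) else m) m) m).getD t none)
      = (m.getD t none).or
          (ss.find? (fun s => ((t : Int) != i) && decide ((t : Int) ∈ B s))) := by
  induction ss generalizing m with
  | nil => simp
  | cons s ss ih =>
    simp only [List.foldl_cons, List.find?]
    have hlen : ((B s).foldl (fun m j =>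
        if j != i && (m.getD j.toNat none).isNone then m.set j.toNat (some s) else m) m).length
        = m.length := bucket_fold_length _ _ _ _
    rw [ih _ (by omega)]
    rw [bucket_fold_getD _ _ _ _ _ ht (hB s)]
    by_cases hc : (t : Int) ∈ B s ∧ (t : Int) ≠ i ∧ m.getD t none = none
    · rw [if_pos hc]
      have : (((t : Int) != i) && decide ((t : Int) ∈ B s)) = true := by
        simp [hc.1, hc.2.1]
      rw [this]
      rcases hc with ⟨-, -, hm⟩
      rw [hm]
      rfl
    · rw [if_neg hc]
      rcases Option.eq_none_or_eq_some (m.getD t none) with hm | ⟨x, hm⟩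
      · have : (((t : Int) != i) && decide ((t : Int) ∈ B s)) = false := by
          rw [Bool.and_eq_false_iff]
          by_cases h1 : (t : Int) ∈ B s
          · left
            by_cases h2 : (t : Int) = i
            · simp [h2]
            · exact absurd ⟨h1, h2, hm⟩ hc
          · right; simp [h1]
        rw [this]
      · rw [hm]
        split <;> simp
  
lemma mfold_length (l : List (List Char)) (i : Int) (d1 : List Char) :
    (mfold l i d1).length = l.length := by
  have key : ∀ (ks : List Int) (m : List (Option (List Char))),
      (ks.foldl (fun m k =>
        ((bIndex l).getD (PySem.Chars.slice d1 (some (-k)) none) []).foldl (fun m j =>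
          if j != i && (m.getD j.toNat none).isNone
          then m.set j.toNat (some (PySem.Chars.slice d1 (some (-k)) none)) else m) m) m).length
      = m.length := by
    intro ks
    induction ks with
    | nil => intro m; rfl
    | cons k ks ih => intro m; simp only [List.foldl_cons]; rw [ih, bucket_fold_length]
  exact (key (PySem.List.pyRange 1 6 1) (List.replicate l.length none)).trans
    (List.length_replicate)

lemma mfold_eq_suffold (l : List (List Char)) (i : Int) (d1 : List Char) :
    mfold l i d1 = (sufs d1).foldl (fun m s =>
      (((bIndex l).getD s []).foldl (fun m j =>
        if j != i && (m.getD j.toNat none).isNone then m.set j.toNat (some s) else m) m))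
      (List.replicate l.length (none : Option (List Char))) := by
  rfl

lemma mfold_getD (l : List (List Char)) (t1 t : Nat)
    (ht1 : t1 < l.length) (ht : t < l.length) :
    (mfold l (t1 : Int) (l[t1])).getD t none =
      if t = t1 then none
      else (sufs l[t1]).find? (fun s => PySem.Chars.startswith l[t] s) := by
  rw [mfold_eq_suffold]
  have hB : ∀ s : List Char, ∀ j ∈ (bIndex l).getD s [], 0 ≤ j := by
    intro s j hj
    rcases (mem_bIndex l s j).mp hj with ⟨t', _, rfl, _⟩
    positivity
  rw [suffold_getD (fun s => (bIndex l).getD s []) hB ((t1 : Nat) : Int) (sufs l[t1]) _ t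
    (by simp [ht])]
  have hrep : (List.replicate l.length (none : Option (List Char))).getD t none = none := by simp
  rw [hrep, Option.none_or]
  have hmem : ∀ s ∈ sufs l[t1],
      ((t : Int) ∈ (bIndex l).getD s []) ↔ PySem.Chars.startswith l[t] s = true := by
    intro s hs
    rw [mem_bIndex]
    constructor
    · rintro ⟨t', ht', hcast, hp⟩
      have : t = t' := by exact_mod_cast hcast
      subst this
      rw [PySem.Chars.startswith_iff]
      exact ((mem_pyPrefixes s _).mp hp).2
    · intro hsw
      exact ⟨t, ht, rfl, (mem_pyPrefixes s _).mpr
        ⟨sufs_short _ _ hs, (PySem.Chars.startswith_iff _ _).mp hsw⟩⟩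
  by_cases hte : t = t1
  · subst hte
    rw [if_pos rfl]
    apply List.find?_eq_none.mpr
    intro s _
    simp
  · rw [if_neg hte]
    apply find?_congr_mem
    intro s hs
    have h1 : (((t : Nat) : Int) != ((t1 : Nat) : Int)) = true := by
      simp [bne]
      omega
    rw [h1, Bool.true_and]
    rcases hb : PySem.Chars.startswith l[t] s with _ | _
    · simp [(hmem s hs), hb]
    · simp [(hmem s hs), hb]

lemma join_nil_eq_flatten (xs : List (List Char)) :
    PySem.Chars.join [] xs = xs.flatten := by
  induction xs with
  | nil => simp [PySem.Chars.join_nil]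
  | cons a t ih =>
    cases t with
    | nil => simp [PySem.Chars.join_singleton]
    | cons b r => rw [PySem.Chars.join_cons_cons] at *; simp_all

lemma flatten_flatMap {α : Type} (f : α → List (List Char)) (L : List α) :
    (L.flatMap f).flatten = L.flatMap (fun x => (f x).flatten) := by
  induction L with
  | nil => simp
  | cons a t ih => simp [List.flatMap_cons, List.flatten_append, ih]

lemma main_lists (l : List (List Char)) :
    (PySem.List.enumerate l).foldl (fun fin p =>
      (PySem.List.enumerate l).foldl (fun fin q =>
        dnaWhile p.2 q.2 (p.1 != q.1) fin (-1) 6) fin) []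
    = PySem.Chars.join []
      ((PySem.List.enumerate l).foldl (fun out p =>
        (PySem.List.enumerate (mfold l p.1 p.2)).foldl (fun out q =>
          match q.2 with
          | some suf => (out ++ [p.2]) ++ [lstripChars (PySem.List.pyGetD l q.1 []) suf]
          | none => out) out) []) := by
  have stepA : (fun (fin : List Char) (p : Int × List Char) =>
      (PySem.List.enumerate l).foldl (fun fin q =>
        dnaWhile p.2 q.2 (p.1 != q.1) fin (-1) 6) fin)
    = (fun fin p => fin ++ (PySem.List.enumerate l).flatMap
        (fun q => if (p.1 != q.1) then pieceFor p.2 q.2 else [])) := by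
    funext fin p
    rw [← PySem.List.foldl_append_eq_flatMap]
    apply List.foldl_ext
    intro a q _
    exact dnaWhile_eq p.2 q.2 (p.1 != q.1) a
  have stepB : (fun (out : List (List Char)) (p : Int × List Char) =>
      (PySem.List.enumerate (mfold l p.1 p.2)).foldl (fun out q =>
        match q.2 with
        | some suf => (out ++ [p.2]) ++ [lstripChars (PySem.List.pyGetD l q.1 []) suf]
        | none => out) out)
    = (fun out p => out ++ (PySem.List.enumerate (mfold l p.1 p.2)).flatMap (hOut p.2 l)) := by
    funext out p
    rw [← PySem.List.foldl_append_eq_flatMap]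
    apply List.foldl_ext
    intro a q _
    rcases q with ⟨j, sq⟩
    cases sq <;> simp [hOut]
  rw [stepA, stepB, PySem.List.foldl_append_eq_flatMap, PySem.List.foldl_append_eq_flatMap,
    join_nil_eq_flatten]
  simp only [List.nil_append]
  rw [flatten_flatMap]
  apply List.flatMap_congr
  intro p hp
  rcases (PySem.List.mem_enumerate_iff l 0 p).mp hp with ⟨t1, ht1, rfl⟩
  simp only [zero_add]
  rw [flatten_flatMap]
  rw [PySem.List.enumerate_eq_map_pyRange l [],
    PySem.List.enumerate_eq_map_pyRange (mfold l ((t1 : Nat) : Int) (l[t1])) none,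
    List.flatMap_map, List.flatMap_map]
  have hlen : PySem.List.len (mfold l ((t1 : Nat) : Int) (l[t1])) = PySem.List.len l := by
    simp [PySem.List.len_eq, mfold_length]
  rw [hlen]
  apply List.flatMap_congr
  intro j hj
  rcases (PySem.List.mem_pyRange_one).mp hj with ⟨hj0, hjn⟩
  obtain ⟨t, rfl⟩ : ∃ t : Nat, j = (t : Int) := ⟨j.toNat, by omega⟩
  have ht : t < l.length := by
    have : PySem.List.len l = (l.length : Int) := by simp [PySem.List.len_eq]
    omega
  simp only [PySem.List.pyGetD_natCast]
  rw [List.getD_eq_getElem l [] ht, List.getD_eq_getElem (mfold _ _ _) none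
    (by rw [mfold_length]; exact ht)]
  have hmf : (mfold l ((t1 : Nat) : Int) (l[t1]))[t]'(by rw [mfold_length]; exact ht)
      = if t = t1 then none
        else (sufs l[t1]).find? (fun s => PySem.Chars.startswith l[t] s) := by
    rw [← List.getD_eq_getElem (mfold _ _ _) none (by rw [mfold_length]; exact ht)]
    exact mfold_getD l t1 t ht1 ht
  rw [hmf]
  by_cases hte : t = t1
  · subst hte
    simp [hOut]
  · have h1 : (((t1 : Nat) : Int) != ((t : Nat) : Int)) = true := by
      simp [bne]; omega
    rw [if_neg hte, h1]
    simp only [if_true]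
    unfold pieceFor
    cases hfind : (sufs l[t1]).find? (fun s => PySem.Chars.startswith l[t] s) with
    | none => simp [hOut]
    | some s => simp [hOut, List.getElem?_eq_getElem ht]

-- ===== VERDICT (by name: the statement is the Claim_ definition above) =====
theorem dna_sequence_spec : Claim_equal_dna_sequence := by
  intro arr _
  show dna_sequence arr = dna_sequence_alt arr
  exact congrArg String.ofList (main_lists (arr.map String.toList))
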